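-- pv_equiv track=rewrite | github.com/r-jelly/program-solving | baekjoon/15683.py | dfs
-- ===== SOURCE A (Python) =====
-- cctv_direction = {
--     1: [[(1, 0)], [(-1, 0)], [(0, 1)], [(0, -1)]],
--     2: [[(1, 0), (-1, 0)], [(0, 1), (0, -1)]],
--     3: [
--         [(-1, 0), (0, 1)],
--         [(0, 1), (1, 0)],
--         [(1, 0), (0, -1)],
--         [(0, -1), (-1, 0)]
--     ],
--     4: [
--         [(-1, 0), (0, 1), (0, -1)],
--         [(0, 1), (1, 0), (-1, 0)],
--         [(1, 0), (0, -1), (0, 1)],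
--         [(0, -1), (-1, 0), (1, 0)]
--     ],
--     5: [[(1, 0), (-1, 0), (0, 1), (0, -1)]]
-- }
--
-- def set_cctv(board, points, direction):
--     p_i, p_j = points
--     di, dj = direction
--
--     next_i, next_j = p_i+di, p_j+dj
--     while 0<=next_i<len(board) and 0<=next_j<len(board[0]):
--         if board[next_i][next_j] == 6:
--             break
--         elif board[next_i][next_j] > 0:
--             pass
--         else:
--             board[next_i][next_j] -= 1
--         next_i, next_j = next_i+di, next_j+dj
--     return board
--
-- def del_cctv(board, points, direction):
--     p_i, p_j = points
--     di, dj = direction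
--
--     next_i, next_j = p_i+di, p_j+dj
--     while (0<=next_i<len(board) and 0<=next_j<len(board[0])):
--         if board[next_i][next_j] == 6:
--             break
--         elif board[next_i][next_j] > 0:
--             pass
--         else:
--             board[next_i][next_j] += 1
--         next_i, next_j = next_i+di, next_j+dj
--     return board
--
-- def dfs(board, points, cur_idx):
--     if cur_idx >= len(points):
--         area = 0
--         for line in board:
--             for p in line:
--                 if p == 0:
--                     area += 1
--         return area
--
--     min_area = float('inf')
--     for i in range(cur_idx, len(points)):
--         cur_point = points[i]
--         cctv_type = board[cur_point[0]][cur_point[1]]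
--
--         for directions in cctv_direction[cctv_type]:
--             for direction in directions:
--                     board = set_cctv(board, cur_point, direction)
--             cur_area = dfs(board, points, i+1)
--             min_area = min(min_area, cur_area)
--             for direction in directions:
--                 board = del_cctv(board, cur_point, direction)
--
--     return min_area
-- ===== SOURCE B (Python) =====
-- cctv_direction = {
--     1: [[(1, 0)], [(-1, 0)], [(0, 1)], [(0, -1)]],
--     2: [[(1, 0), (-1, 0)], [(0, 1), (0, -1)]],
--     3: [
--         [(-1, 0), (0, 1)],
--         [(0, 1), (1, 0)],
--         [(1, 0), (0, -1)],
--         [(0, -1), (-1, 0)]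
--     ],
--     4: [
--         [(-1, 0), (0, 1), (0, -1)],
--         [(0, 1), (1, 0), (-1, 0)],
--         [(1, 0), (0, -1), (0, 1)],
--         [(0, -1), (-1, 0), (1, 0)]
--     ],
--     5: [[(1, 0), (-1, 0), (0, 1), (0, -1)]]
-- }
--
--
-- def dfs(board, points, cur_idx):
--     # Immutable strategy: the board is never modified.  Each CCTV placement is a
--     # frozenset of covered cells computed by ray casting on the ORIGINAL board
--     # (walls and CCTVs never move), and the recursion goes straight from
--     # cur_idx to cur_idx+1 carrying the covered set, so each CCTV is placed
--     # exactly once per branch and there is no undo pass.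
--     rows = len(board)
--     cols = len(board[0]) if board else 0
--
--     def ray(r, c, dr, dc):
--         cells = []
--         r, c = r + dr, c + dc
--         while 0 <= r < rows and 0 <= c < cols:
--             v = board[r][c]
--             if v == 6:
--                 break
--             if v <= 0:
--                 cells.append((r, c))
--             r, c = r + dr, c + dc
--         return cells
--
--     def solve(idx, covered):
--         if idx >= len(points):
--             return sum(1 for i, line in enumerate(board)
--                          for j, p in enumerate(line)
--                          if p == 0 and (i, j) not in covered)
--         r, c = points[idx]
--         best = None
--         for directions in cctv_direction[board[r][c]]:
--             new_cov = covered
--             for dr, dc in directions: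
--                 new_cov = new_cov | frozenset(ray(r, c, dr, dc))
--             cur = solve(idx + 1, new_cov)
--             if best is None or cur < best:
--                 best = cur
--         return best
--
--     return solve(cur_idx, frozenset())
-- ===== Notes on version B (the rewrite author's own statement) =====
-- stated objective: alternative
-- what changed: A re-chooses at every level WHICH remaining CCTV to place next (an extra subset-branching loop over i in range(cur_idx, len(points))) and marks coverage by decrementing/restoring cells of a mutable board; B recurses straight from cur_idx to cur_idx+1, placing each CCTV exactly once, and carries an immutable frozenset of covered cells computed by ray casting on the untouched board (walls and CCTVs never move), so no undo pass exists.
import Mathlib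
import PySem

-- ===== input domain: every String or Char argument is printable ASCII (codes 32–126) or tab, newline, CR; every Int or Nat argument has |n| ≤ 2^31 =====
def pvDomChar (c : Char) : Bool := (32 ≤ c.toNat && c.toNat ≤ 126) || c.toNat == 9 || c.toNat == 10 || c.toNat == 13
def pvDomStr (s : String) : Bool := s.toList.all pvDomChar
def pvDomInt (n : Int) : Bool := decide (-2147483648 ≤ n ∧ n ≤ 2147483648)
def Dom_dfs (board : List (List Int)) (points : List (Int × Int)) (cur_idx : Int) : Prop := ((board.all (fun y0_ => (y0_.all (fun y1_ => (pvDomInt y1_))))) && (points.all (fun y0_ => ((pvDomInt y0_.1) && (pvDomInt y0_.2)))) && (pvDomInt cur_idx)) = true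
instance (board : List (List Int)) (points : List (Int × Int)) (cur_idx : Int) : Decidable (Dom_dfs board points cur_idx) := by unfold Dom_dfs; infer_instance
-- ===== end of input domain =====

-- B replaces A's subset-branching DFS (re-choosing which CCTV to place next, with in-place
-- board decrements and undo passes) by a straight recursion on cur_idx+1 carrying an immutable
-- set of covered cells (objective: alternative — one branching dimension disappears, no undo).
-- Equivalence is about the RETURN value: A temporarily mutates its board argument (it restores
-- it before returning); B never mutates.

-- ===== PORT A =====
-- the module-level cctv_direction dict (keys 1..5; any other key is a KeyError, outside Pre_)
def cctvDirs (t : Int) : List (List (Int × Int)) :=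
  if t = 1 then [[(1,0)],[(-1,0)],[(0,1)],[(0,-1)]]
  else if t = 2 then [[(1,0),(-1,0)],[(0,1),(0,-1)]]
  else if t = 3 then [[(-1,0),(0,1)],[(0,1),(1,0)],[(1,0),(0,-1)],[(0,-1),(-1,0)]]
  else if t = 4 then [[(-1,0),(0,1),(0,-1)],[(0,1),(1,0),(-1,0)],[(1,0),(0,-1),(0,1)],[(0,-1),(-1,0),(1,0)]]
  else if t = 5 then [[(1,0),(-1,0),(0,1),(0,-1)]]
  else []

-- board[i] (IndexError → default [], only reachable outside Pre_)
def pvRow (b : List (List Int)) (i : Int) : List Int := (PySem.List.pyGet? b i).getD []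
-- board[i][j] (Python index semantics; default 0 only reachable outside Pre_)
def pvCell (b : List (List Int)) (i j : Int) : Int := (PySem.List.pyGet? (pvRow b i) j).getD 0
def pvSetCell (b : List (List Int)) (i j : Nat) (v : Int) : List (List Int) :=
  b.modify i (fun row => row.set j v)

-- the while-loop shared by set_cctv (δ = -1) and del_cctv (δ = +1): walk from (i,j) in
-- direction (di,dj) while in bounds, stop at a 6, skip positive cells, add δ to the rest.
-- fuel = rows + cols + 1 is enough for the unit directions dfs uses (each step moves one
-- coordinate by 1 and the in-bounds run is contiguous).
def pvWalk (b : List (List Int)) (i j di dj δ : Int) : Nat → List (List Int)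
  | 0 => b
  | f+1 =>
    if 0 ≤ i ∧ i < (b.length : Int) ∧ 0 ≤ j ∧ j < ((pvRow b 0).length : Int) then
      let v := pvCell b i j
      if v = 6 then b
      else if 0 < v then pvWalk b (i+di) (j+dj) di dj δ f
      else pvWalk (pvSetCell b i.toNat j.toNat (v + δ)) (i+di) (j+dj) di dj δ f
    else b

def set_cctv (b : List (List Int)) (p d : Int × Int) : List (List Int) :=
  pvWalk b (p.1 + d.1) (p.2 + d.2) d.1 d.2 (-1) (b.length + (pvRow b 0).length + 1)

def del_cctv (b : List (List Int)) (p d : Int × Int) : List (List Int) :=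
  pvWalk b (p.1 + d.1) (p.2 + d.2) d.1 d.2 1 (b.length + (pvRow b 0).length + 1)

-- the base-case area count of A
def countZeros (b : List (List Int)) : Int :=
  b.foldl (fun a line => line.foldl (fun a p => if p = 0 then a + 1 else a) a) 0

-- min_area as Option Int: none = float('inf'); min(min_area, cur)
def aMin (m : Option Int) (x : Int) : Option Int :=
  match m with
  | none => some x
  | some y => some (min y x)

def dfsAuxA : Nat → List (List Int) → List (Int × Int) → Int → Int
  | 0, _, _, _ => 0
  | f+1, board, points, cur_idx =>
    if (points.length : Int) ≤ cur_idx then countZeros board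
    else
      let st := (PySem.List.pyRange cur_idx (points.length : Int) 1).foldl
        (fun (st : List (List Int) × Option Int) i =>
          let cur_point := (PySem.List.pyGet? points i).getD (0, 0)
          let t := pvCell st.1 cur_point.1 cur_point.2
          (cctvDirs t).foldl
            (fun (st2 : List (List Int) × Option Int) directions =>
              let bd2 := directions.foldl (fun b d => set_cctv b cur_point d) st2.1
              let m2 := aMin st2.2 (dfsAuxA f bd2 points (i+1))
              let bd3 := directions.foldl (fun b d => del_cctv b cur_point d) bd2
              (bd3, m2))
            st)
        (board, none)
      st.2.getD 0   -- .getD 0: the none branch is Python's float('inf'), unreachable under Pre_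

def dfs (board : List (List Int)) (points : List (Int × Int)) (cur_idx : Int) : Int :=
  -- recursion depth is at most len(points) - cur_idx + 1; the fuel covers it
  dfsAuxA (((points.length : Int) + 1 - cur_idx).toNat + 1) board points cur_idx

-- ===== PORT B =====
-- ray(r, c, dr, dc): the covered cells of one ray, cast on the (never-modified) board;
-- same fuel bound as pvWalk.  rows = len(board), cols = len(board[0]) if board else 0
-- (= (pvRow b 0).length: the default [] is exactly the empty-board guard).
def rayF (b : List (List Int)) (i j di dj : Int) : Nat → List (Int × Int)
  | 0 => []
  | f+1 =>
    if 0 ≤ i ∧ i < (b.length : Int) ∧ 0 ≤ j ∧ j < ((pvRow b 0).length : Int) then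
      let v := pvCell b i j
      if v = 6 then []
      else if v ≤ 0 then (i, j) :: rayF b (i+di) (j+dj) di dj f
      else rayF b (i+di) (j+dj) di dj f
    else []

def bRay (b : List (List Int)) (p d : Int × Int) : List (Int × Int) :=
  rayF b (p.1 + d.1) (p.2 + d.2) d.1 d.2 (b.length + (pvRow b 0).length + 1)

-- sum(1 for i, line in enumerate(board) for j, p in enumerate(line) if p == 0 and (i,j) not in covered)
def countUncov (b : List (List Int)) (cov : PySem.Set (Int × Int)) : Int :=
  ((PySem.List.enumerate b).map (fun li =>
    ((PySem.List.enumerate li.2).map (fun jp =>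
      if jp.2 = 0 ∧ ¬ (li.1, jp.1) ∈ cov then (1 : Int) else 0)).sum)).sum

-- best = cur if best is None or cur < best
def bMin (best : Option Int) (cur : Int) : Option Int :=
  match best with
  | none => some cur
  | some bv => if cur < bv then some cur else some bv

def dfsAuxB : Nat → List (List Int) → List (Int × Int) → Int → PySem.Set (Int × Int) → Int
  | 0, _, _, _, _ => 0
  | f+1, board, points, idx, covered =>
    if (points.length : Int) ≤ idx then countUncov board covered
    else
      let p := (PySem.List.pyGet? points idx).getD (0, 0)
      let best := (cctvDirs (pvCell board p.1 p.2)).foldl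
        (fun (best : Option Int) directions =>
          let newCov := directions.foldl
            (fun cv d => PySem.Set.union cv (PySem.Set.ofList (bRay board p d))) covered
          bMin best (dfsAuxB f board points (idx+1) newCov))
        none
      best.getD 0   -- none unreachable under Pre_ (every direction group list is nonempty)

def dfs_alt (board : List (List Int)) (points : List (Int × Int)) (cur_idx : Int) : Int :=
  dfsAuxB (((points.length : Int) + 1 - cur_idx).toNat + 1) board points cur_idx PySem.Set.empty

-- ===== PRECONDITION & SPEC =====
-- the CCTV-type cell points[j] must exist (Python index semantics) and hold a value 1..5
def validPtB (b : List (List Int)) (p : Int × Int) : Bool :=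
  match (PySem.List.pyGet? b p.1).bind (fun row => PySem.List.pyGet? row p.2) with
  | some v => decide (1 ≤ v ∧ v ≤ 5)
  | none => false

-- Pre_ admits: the pure-counting case cur_idx ≥ len(points) (A is total there), and otherwise
-- exactly the inputs where every placement step of A returns normally: cur_idx ≥ -len(points)
-- (else points[cur_idx] is an IndexError), every row at least as long as row 0 (else a ray walk
-- hits an IndexError; rows strictly longer than row 0 are merely never walked past col len(board[0])),
-- and every CCTV index j that the recursion can reach names a cell holding a type 1..5 (else a
-- KeyError in cctv_direction or an IndexError on the point lookup).
def Pre_dfs (board : List (List Int)) (points : List (Int × Int)) (cur_idx : Int) : Prop :=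
  (points.length : Int) ≤ cur_idx ∨
  ( -(points.length : Int) ≤ cur_idx ∧
    (∀ row ∈ board, (pvRow board 0).length ≤ row.length) ∧
    (∀ j ∈ List.range points.length, (cur_idx ≤ (j : Int) ∨ cur_idx < 0) →
        validPtB board (points.getD j ((0 : Int), (0 : Int))) = true))
instance (board : List (List Int)) (points : List (Int × Int)) (cur_idx : Int) : Decidable (Pre_dfs board points cur_idx) := by unfold Pre_dfs; infer_instance

def pvWitness_dfs : List (List Int) × (List (Int × Int)) × Int := ([[1, 0], [0, 6]], [(0, 0)], 0)

def Spec_dfs (board : List (List Int)) (points : List (Int × Int)) (cur_idx : Int) (out : Int) : Prop := out = dfs_alt board points cur_idx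
instance (board : List (List Int)) (points : List (Int × Int)) (cur_idx : Int) (out : Int) : Decidable (Spec_dfs board points cur_idx out) := by unfold Spec_dfs; infer_instance

-- ===== CLAIM (what is proved, stated in full; the proofs are below) =====
def Claim_equal_dfs : Prop := ∀ (board : List (List Int)) (points : List (Int × Int)) (cur_idx : Int), Dom_dfs board points cur_idx → Pre_dfs board points cur_idx → Spec_dfs board points cur_idx (dfs board points cur_idx)

-- ===== LEMMAS AND PROOFS =====

-- number of columns the while-loops bound by: len(board[0])
def colsN (b : List (List Int)) : Nat := (pvRow b 0).length
-- every row at least cols long (the walked cells exist)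
def Rect (b : List (List Int)) : Prop := ∀ row ∈ b, colsN b ≤ row.length
-- the simulation relation: b' is A's working board, b the original, κ counts, per cell,
-- how many currently-placed rays cover it (cells > 0 are never touched by a walk)
def KRel (b b' : List (List Int)) (κ : Int × Int → Int) : Prop :=
  b'.map List.length = b.map List.length ∧
  ∀ a c : Int, 0 ≤ a → 0 ≤ c →
    pvCell b' a c = if 0 < pvCell b a c then pvCell b a c else pvCell b a c - κ (a, c)

lemma KRel_congr {b b' : List (List Int)} {κ κ' : Int × Int → Int}
    (h : KRel b b' κ) (hk : ∀ p, κ p = κ' p) : KRel b b' κ' := by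
  refine ⟨h.1, fun a c ha hc => ?_⟩
  rw [h.2 a c ha hc, hk]

lemma len_eq_of_maplen {b b' : List (List Int)}
    (h : b'.map List.length = b.map List.length) : b'.length = b.length := by
  have := congrArg List.length h
  simpa using this

lemma getElem?_maplen {b b' : List (List Int)} (h : b'.map List.length = b.map List.length)
    (k : Nat) : b'[k]?.map List.length = b[k]?.map List.length := by
  rw [← List.getElem?_map, ← List.getElem?_map, h]

lemma row_maplen {b b' : List (List Int)} (h : b'.map List.length = b.map List.length)
    (i : Int) : (pvRow b' i).length = (pvRow b i).length := by
  unfold pvRow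
  simp only [PySem.List.pyGet?, len_eq_of_maplen h]
  cases hk : PySem.List.pyIdx? b.length i with
  | none => simp
  | some k =>
    simp only [Option.bind_some]
    have hm := getElem?_maplen h k
    cases h1 : b[k]? with
    | none =>
      have : b'[k]? = none := by
        rw [h1] at hm; simpa using hm
      simp [this]
    | some r =>
      rw [h1] at hm
      cases h2 : b'[k]? with
      | none => rw [h2] at hm; simp at hm
      | some r' =>
        rw [h2] at hm
        simp only [Option.map_some, Option.some.injEq] at hm
        simp [hm]

-- pvCell after pvSetCell
lemma pvCell_set (b : List (List Int)) (i j : Nat) (v : Int)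
    (hi : i < b.length) (hj : j < (pvRow b (i : Int)).length) :
    ∀ a c : Int, 0 ≤ a → 0 ≤ c →
      pvCell (pvSetCell b i j v) a c =
        if a = (i : Int) ∧ c = (j : Int) then v else pvCell b a c := by
  intro a c ha hc
  have hrow : pvRow b (i : Int) = b[i] := by
    unfold pvRow
    rw [PySem.List.pyGet?_natCast]
    simp [List.getElem?_eq_getElem hi]
  have hj' : j < b[i].length := by rwa [hrow] at hj
  unfold pvCell pvRow
  rw [PySem.List.pyGet?_of_nonneg _ ha, PySem.List.pyGet?_of_nonneg _ ha]
  simp only [pvSetCell, List.getElem?_modify]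
  by_cases hai : a = (i : Int)
  · subst hai
    simp only [Int.toNat_natCast]
    simp only [List.getElem?_eq_getElem hi, Option.map_eq_map, Option.map_some, if_true, true_and, Option.getD_some]
    rw [PySem.List.pyGet?_of_nonneg _ hc, PySem.List.pyGet?_of_nonneg _ hc]
    by_cases hcj : c = (j : Int)
    · subst hcj
      simp only [Int.toNat_natCast]
      rw [List.getElem?_set]
      simp [hj']
    · have hne : j ≠ c.toNat := by omega
      rw [List.getElem?_set, if_neg hne]
      simp [hcj]
  · have hne : i ≠ a.toNat := by omega
    simp only [if_neg hne]
    have : (Option.map (fun a => a) b[a.toNat]?) = b[a.toNat]? := by simp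
    rw [if_neg (by tauto)]
    cases hb : b[a.toNat]? <;> simp

lemma maplen_set (b : List (List Int)) (i j : Nat) (v : Int) :
    (pvSetCell b i j v).map List.length = b.map List.length := by
  apply List.ext_getElem?
  intro k
  simp only [List.getElem?_map, pvSetCell, List.getElem?_modify]
  cases b[k]? with
  | none => rfl
  | some r =>
    simp only [Option.map_some]
    split <;> simp

lemma pvRow_idx (b : List (List Int)) (a : Int) :
    pvRow b a = (match PySem.List.pyIdx? b.length a with
      | none => ([] : List Int)
      | some k => b[k]?.getD []) := by
  unfold pvRow PySem.List.pyGet?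
  cases h : PySem.List.pyIdx? b.length a <;> simp

lemma pyIdx?_lt {n : Nat} {i : Int} {k : Nat} (h : PySem.List.pyIdx? n i = some k) : k < n := by
  unfold PySem.List.pyIdx? at h
  split_ifs at h <;> simp_all <;> omega

lemma pvRow_natCast (b : List (List Int)) (k : Nat) (hk : k < b.length) :
    pvRow b (k : Int) = b[k] := by
  unfold pvRow
  rw [PySem.List.pyGet?_natCast]
  simp [List.getElem?_eq_getElem hk]

lemma pvCell_nil (c : Int) : (PySem.List.pyGet? ([] : List Int) c).getD 0 = 0 := by
  unfold PySem.List.pyGet?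
  cases PySem.List.pyIdx? ([] : List Int).length c <;> simp

lemma pvRow_of_idx {b : List (List Int)} {a : Int} {k : Nat}
    (hk : PySem.List.pyIdx? b.length a = some k) : pvRow b a = pvRow b (k : Int) := by
  rw [pvRow_idx b a, hk, pvRow_natCast b k (pyIdx?_lt hk)]
  simp [List.getElem?_eq_getElem (pyIdx?_lt hk)]

lemma pvCell_wrap {b : List (List Int)} (a c : Int) {k m : Nat}
    (hk : PySem.List.pyIdx? b.length a = some k)
    (hm : PySem.List.pyIdx? (pvRow b (k : Int)).length c = some m) :
    pvCell b a c = pvCell b (k : Int) (m : Int) := by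
  have h1 : pvRow b a = pvRow b (k : Int) := pvRow_of_idx hk
  unfold pvCell
  rw [h1]
  congr 1
  unfold PySem.List.pyGet?
  rw [hm, PySem.List.pyIdx?]
  have := pyIdx?_lt hm
  simp only [if_pos (Int.natCast_nonneg m)]
  rw [if_pos (by exact_mod_cast this)]
  simp

-- cells that are positive in b are identical in any KRel-related board (any index, Python wrap)
lemma cell_eq_of_pos {b b' : List (List Int)} {κ : Int × Int → Int} (h : KRel b b' κ)
    (a c : Int) (hpos : 0 < pvCell b a c) : pvCell b' a c = pvCell b a c := by
  obtain ⟨hlen, hcell⟩ := h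
  have hL := len_eq_of_maplen hlen
  cases hk : PySem.List.pyIdx? b.length a with
  | none =>
    exfalso
    have : pvCell b a c = 0 := by
      unfold pvCell
      rw [pvRow_idx b a, hk]
      exact pvCell_nil c
    omega
  | some k =>
    have hk' : k < b.length := pyIdx?_lt hk
    cases hm : PySem.List.pyIdx? (pvRow b (k : Int)).length c with
    | none =>
      exfalso
      have h1 : pvRow b a = pvRow b (k : Int) := pvRow_of_idx hk
      have : pvCell b a c = 0 := by
        unfold pvCell
        rw [h1]
        unfold PySem.List.pyGet?
        rw [hm]
        simp
      omega
    | some m =>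
      have e1 : pvCell b a c = pvCell b (k : Int) (m : Int) := pvCell_wrap a c hk hm
      have hk2 : PySem.List.pyIdx? b'.length a = some k := by rw [hL]; exact hk
      have hm2 : PySem.List.pyIdx? (pvRow b' (k : Int)).length c = some m := by
        rw [row_maplen hlen]; exact hm
      have e2 : pvCell b' a c = pvCell b' (k : Int) (m : Int) := pvCell_wrap a c hk2 hm2
      rw [e1, e2]
      rw [hcell (k : Int) (m : Int) (Int.natCast_nonneg k) (Int.natCast_nonneg m)]
      rw [e1] at hpos
      rw [if_pos hpos]

-- every cell of a ray lies ahead of the start in the walk direction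
lemma rayF_proj {b : List (List Int)} {di dj : Int} (hd : di * di + dj * dj = 1) :
    ∀ (f : Nat) (i j : Int) (p : Int × Int), p ∈ rayF b i j di dj f →
      i * di + j * dj ≤ p.1 * di + p.2 * dj := by
  intro f
  induction f with
  | zero => intro i j p hp; simp [rayF] at hp
  | succ f ih =>
    intro i j p hp
    have key : (i + di) * di + (j + dj) * dj = i * di + j * dj + 1 := by
      have : (i + di) * di + (j + dj) * dj = i * di + j * dj + (di * di + dj * dj) := by ring
      rw [this, hd]
    simp only [rayF] at hp
    split_ifs at hp with h1 h2 h3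
    · simp at hp
    · rcases List.mem_cons.mp hp with rfl | hp'
      · simp
      · have := ih _ _ p hp'
        omega
    · have := ih _ _ p hp
      omega
    · simp at hp

lemma not_mem_ray_next {b : List (List Int)} {di dj : Int} (hd : di * di + dj * dj = 1)
    (f : Nat) (i j : Int) : (i, j) ∉ rayF b (i + di) (j + dj) di dj f := by
  intro hmem
  have := rayF_proj hd f (i + di) (j + dj) (i, j) hmem
  nlinarith [this]

-- the walk simulation: A's while-loop on the working board is, through KRel, exactly a
-- δ-update of κ along the ray computed on the original board
lemma walk_sim {b : List (List Int)} (hrect : Rect b) {di dj δ : Int}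
    (hd : di * di + dj * dj = 1) (hδ : δ = -1 ∨ δ = 1) :
    ∀ (f : Nat) (i j : Int) (b' : List (List Int)) (κ : Int × Int → Int),
      KRel b b' κ → (∀ p, 0 ≤ κ p) →
      (δ = 1 → ∀ p ∈ rayF b i j di dj f, 1 ≤ κ p) →
      KRel b (pvWalk b' i j di dj δ f)
        (fun p => κ p - δ * (if p ∈ rayF b i j di dj f then 1 else 0)) ∧
      (∀ p, 0 ≤ κ p - δ * (if p ∈ rayF b i j di dj f then 1 else 0)) := by
  intro f
  induction f with
  | zero =>
    intro i j b' κ h hpos _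
    refine ⟨KRel_congr h (fun p => by simp [rayF]), fun p => by simpa [rayF] using hpos p⟩
  | succ f ih =>
    intro i j b' κ h hpos hray
    have hL : b'.length = b.length := len_eq_of_maplen h.1
    have hC : (pvRow b' 0).length = (pvRow b 0).length := row_maplen h.1 0
    by_cases hc : 0 ≤ i ∧ i < (b.length : Int) ∧ 0 ≤ j ∧ j < ((pvRow b 0).length : Int)
    · have hc' : 0 ≤ i ∧ i < (b'.length : Int) ∧ 0 ≤ j ∧ j < ((pvRow b' 0).length : Int) := by
        rw [hL, hC]; exact hc
      have hcell := h.2 i j hc.1 hc.2.2.1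
      by_cases hvp : 0 < pvCell b i j
      · have hv' : pvCell b' i j = pvCell b i j := by rw [hcell, if_pos hvp]
        by_cases hv6 : pvCell b i j = 6
        · -- wall: both stop
          have : pvWalk b' i j di dj δ (f+1) = b' := by
            simp only [pvWalk, if_pos hc']
            rw [hv', if_pos hv6]
          rw [this]
          have hray0 : rayF b i j di dj (f+1) = [] := by
            simp only [rayF, if_pos hc, if_pos hv6]
          rw [hray0]
          exact ⟨KRel_congr h (fun p => by simp), fun p => by simpa using hpos p⟩
        · -- positive (a CCTV): both walk on unchanged
          have hw : pvWalk b' i j di dj δ (f+1) = pvWalk b' (i+di) (j+dj) di dj δ f := by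
            simp only [pvWalk, if_pos hc']
            rw [hv', if_neg hv6, if_pos hvp]
          have hr : rayF b i j di dj (f+1) = rayF b (i+di) (j+dj) di dj f := by
            simp only [rayF, if_pos hc, if_neg hv6, if_neg (by omega : ¬ pvCell b i j ≤ 0)]
          rw [hw, hr]
          exact ih (i+di) (j+dj) b' κ h hpos (by intro h1 p hp; exact hray h1 p (by rw [hr]; exact hp))
      · -- coverable cell: A adds δ, B's ray records it
        have hvle : pvCell b i j ≤ 0 := by omega
        have hκpos := hpos (i, j)
        have hv' : pvCell b' i j = pvCell b i j - κ (i, j) := by rw [hcell, if_neg hvp]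
        have hv6' : ¬ pvCell b' i j = 6 := by omega
        have hvp' : ¬ 0 < pvCell b' i j := by omega
        have hr : rayF b i j di dj (f+1) = (i, j) :: rayF b (i+di) (j+dj) di dj f := by
          simp only [rayF, if_pos hc, if_neg (by omega : ¬ pvCell b i j = 6), if_pos hvle]
        have hmemhead : (i, j) ∈ rayF b i j di dj (f+1) := by rw [hr]; simp
        have hnm := not_mem_ray_next (b := b) hd f i j
        have hi' : i.toNat < b'.length := by omega
        have hj' : j.toNat < (pvRow b' ((i.toNat : Nat) : Int)).length := by
          rw [pvRow_natCast b' i.toNat hi']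
          have h1 : b'[i.toNat].length = (b[i.toNat]'(by omega)).length := by
            have := getElem?_maplen h.1 i.toNat
            rw [List.getElem?_eq_getElem hi', List.getElem?_eq_getElem (by omega : i.toNat < b.length)] at this
            simpa using this
          have h2 : colsN b ≤ (b[i.toNat]'(by omega)).length :=
            hrect _ (List.getElem_mem _)
          have h3 : j < (colsN b : Int) := hc.2.2.2
          have hcc : colsN b = (pvRow b 0).length := rfl
          omega
        have hw : pvWalk b' i j di dj δ (f+1)
            = pvWalk (pvSetCell b' i.toNat j.toNat (pvCell b' i j + δ)) (i+di) (j+dj) di dj δ f := by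
          simp only [pvWalk, if_pos hc']
          rw [if_neg hv6', if_neg hvp']
        set κ'' : Int × Int → Int := fun p => if p = (i, j) then κ p - δ else κ p with hκ''
        have hrel'' : KRel b (pvSetCell b' i.toNat j.toNat (pvCell b' i j + δ)) κ'' := by
          refine ⟨by rw [maplen_set]; exact h.1, fun a c ha hcc => ?_⟩
          rw [pvCell_set b' i.toNat j.toNat _ hi' hj' a c ha hcc]
          by_cases hac : a = (i.toNat : Int) ∧ c = (j.toNat : Int)
          · rw [if_pos hac]
            have hai : a = i := by omega
            have hcj : c = j := by omega
            subst hai; subst hcj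
            simp only [hκ'', if_pos rfl, if_neg hvp]
            omega
          · rw [if_neg hac]
            rw [h.2 a c ha hcc]
            simp only [hκ'']
            have hne : ¬ (a, c) = (i, j) := by
              intro hEq
              apply hac
              constructor <;> [skip; skip] <;>
                (first
                  | (have : a = i := congrArg Prod.fst hEq; omega)
                  | (have : c = j := congrArg Prod.snd hEq; omega))
            simp only [if_neg hne]
        have hpos'' : ∀ p, 0 ≤ κ'' p := by
          intro p
          simp only [hκ'']
          by_cases hp : p = (i, j)
          · rw [if_pos hp]
            rcases hδ with rfl | rfl
            · have := hpos p
              omega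
            · have := hray rfl (i, j) hmemhead
              subst hp
              omega
          · rw [if_neg hp]; exact hpos p
        have hray'' : δ = 1 → ∀ p ∈ rayF b (i+di) (j+dj) di dj f, 1 ≤ κ'' p := by
          intro h1 p hp
          have hpne : ¬ p = (i, j) := fun hEq => hnm (hEq ▸ hp)
          simp only [hκ'', if_neg hpne]
          exact hray h1 p (by rw [hr]; exact List.mem_cons_of_mem _ hp)
        obtain ⟨hrelf, hposf⟩ := ih (i+di) (j+dj) _ κ'' hrel'' hpos'' hray''
        rw [hw, hr]
        constructor
        · refine KRel_congr hrelf (fun p => ?_)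
          by_cases hp : p = (i, j)
          · subst hp
            simp only [hκ'', if_pos rfl, if_neg hnm, List.mem_cons, true_or, if_pos]
            ring
          · simp only [hκ'', if_neg hp, List.mem_cons]
            have heq : (p = (i, j) ∨ p ∈ rayF b (i+di) (j+dj) di dj f) ↔ p ∈ rayF b (i+di) (j+dj) di dj f := by
              simp [hp]
            rw [if_congr heq rfl rfl]
        · intro p
          have := hposf p
          by_cases hp : p = (i, j)
          · subst hp
            simp only [hκ'', if_pos rfl, if_neg hnm] at this ⊢
            simp only [List.mem_cons, true_or, if_pos]
            omega
          · simp only [hκ'', if_neg hp] at this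
            simp only [List.mem_cons]
            have heq : (p = (i, j) ∨ p ∈ rayF b (i+di) (j+dj) di dj f) ↔ p ∈ rayF b (i+di) (j+dj) di dj f := by
              simp [hp]
            rw [if_congr heq rfl rfl]
            exact this
    · -- out of bounds: both stop
      have hc' : ¬ (0 ≤ i ∧ i < (b'.length : Int) ∧ 0 ≤ j ∧ j < ((pvRow b' 0).length : Int)) := by
        rw [hL, hC]; exact hc
      have hw : pvWalk b' i j di dj δ (f+1) = b' := by
        simp only [pvWalk, if_neg hc']
      have hr : rayF b i j di dj (f+1) = [] := by
        simp only [rayF, if_neg hc]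
      rw [hw, hr]
      exact ⟨KRel_congr h (fun p => by simp), fun p => by simpa using hpos p⟩

-- per-cell number of rays of the direction list l (cast from point p) covering q
def raysCnt (b : List (List Int)) (p : Int × Int) (l : List (Int × Int)) (q : Int × Int) : Int :=
  (l.map (fun d => if q ∈ bRay b p d then (1 : Int) else 0)).sum

lemma raysCnt_nonneg (b : List (List Int)) (p : Int × Int) (l : List (Int × Int)) (q : Int × Int) :
    0 ≤ raysCnt b p l q := by
  apply List.sum_nonneg
  intro x hx
  simp only [List.mem_map] at hx
  obtain ⟨d, _, rfl⟩ := hx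
  split <;> omega

lemma raysCnt_ne_zero_iff (b : List (List Int)) (p : Int × Int) (l : List (Int × Int)) (q : Int × Int) :
    raysCnt b p l q ≠ 0 ↔ ∃ d ∈ l, q ∈ bRay b p d := by
  induction l with
  | nil => simp [raysCnt]
  | cons d l ih =>
    have hnn := raysCnt_nonneg b p l q
    simp only [raysCnt, List.map_cons, List.sum_cons] at *
    by_cases hq : q ∈ bRay b p d
    · rw [if_pos hq]
      constructor
      · intro _; exact ⟨d, by simp, hq⟩
      · intro _; omega
    · rw [if_neg hq]
      simp only [List.mem_cons, zero_add]
      constructor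
      · intro hne
        obtain ⟨d', hd', hq'⟩ := ih.mp hne
        exact ⟨d', Or.inr hd', hq'⟩
      · rintro ⟨d', hd', hq'⟩
        rcases hd' with rfl | hd'
        · exact absurd hq' hq
        · exact ih.mpr ⟨d', hd', hq'⟩

lemma raysCnt_cons (b : List (List Int)) (p : Int × Int) (d : Int × Int) (l : List (Int × Int)) (q : Int × Int) :
    raysCnt b p (d :: l) q = (if q ∈ bRay b p d then (1 : Int) else 0) + raysCnt b p l q := by
  simp [raysCnt]

-- one set_cctv through walk_sim, fuels aligned to the original board
lemma set_one {b : List (List Int)} (hrect : Rect b) (p d : Int × Int)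
    (hd : d.1 * d.1 + d.2 * d.2 = 1) {bd : List (List Int)} {κ : Int × Int → Int}
    (h : KRel b bd κ) (hpos : ∀ q, 0 ≤ κ q) :
    KRel b (set_cctv bd p d) (fun q => κ q + (if q ∈ bRay b p d then 1 else 0)) := by
  have hfuel : bd.length + (pvRow bd 0).length + 1 = b.length + (pvRow b 0).length + 1 := by
    rw [len_eq_of_maplen h.1, row_maplen h.1]
  have hws := (walk_sim hrect hd (Or.inl rfl) (bd.length + (pvRow bd 0).length + 1)
      (p.1 + d.1) (p.2 + d.2) bd κ h hpos (fun h1 => absurd h1 (by norm_num))).1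
  unfold set_cctv
  refine KRel_congr hws (fun q => ?_)
  rw [hfuel]
  show κ q - (-1) * _ = _
  unfold bRay
  ring

lemma del_one {b : List (List Int)} (hrect : Rect b) (p d : Int × Int)
    (hd : d.1 * d.1 + d.2 * d.2 = 1) {bd : List (List Int)} {κ : Int × Int → Int}
    (h : KRel b bd (fun q => κ q + (if q ∈ bRay b p d then 1 else 0))) (hpos : ∀ q, 0 ≤ κ q) :
    KRel b (del_cctv bd p d) κ := by
  have hfuel : bd.length + (pvRow bd 0).length + 1 = b.length + (pvRow b 0).length + 1 := by
    rw [len_eq_of_maplen h.1, row_maplen h.1]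
  have hws := (walk_sim hrect hd (Or.inr rfl) (bd.length + (pvRow bd 0).length + 1)
      (p.1 + d.1) (p.2 + d.2) bd _ h
      (fun q => by have := hpos q; split <;> omega)
      (fun _ q hq => by
        have := hpos q
        rw [hfuel] at hq
        have hq' : q ∈ bRay b p d := hq
        rw [if_pos hq']
        omega)).1
  unfold del_cctv
  refine KRel_congr hws (fun q => ?_)
  rw [hfuel]
  show (κ q + _) - 1 * _ = _
  unfold bRay
  split <;> ring

-- folding set_cctv over a direction group adds the group's rays to κ
lemma set_group {b : List (List Int)} (hrect : Rect b) (p : Int × Int) :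
    ∀ (l : List (Int × Int)), (∀ d ∈ l, d.1 * d.1 + d.2 * d.2 = 1) →
    ∀ (bd : List (List Int)) (κ : Int × Int → Int), KRel b bd κ → (∀ q, 0 ≤ κ q) →
      KRel b (l.foldl (fun x d => set_cctv x p d) bd) (fun q => κ q + raysCnt b p l q) := by
  intro l
  induction l with
  | nil =>
    intro _ bd κ h _
    exact KRel_congr h (fun q => by simp [raysCnt])
  | cons d l ih =>
    intro hu bd κ h hpos
    simp only [List.foldl_cons]
    have h1 := set_one hrect p d (hu d (by simp)) h hpos
    have h2 := ih (fun d' hd' => hu d' (by simp [hd'])) (set_cctv bd p d) _ h1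
      (fun q => by have := hpos q; split <;> omega)
    refine KRel_congr h2 (fun q => ?_)
    rw [raysCnt_cons]
    ring

-- folding del_cctv over the same group takes them away again
lemma del_group {b : List (List Int)} (hrect : Rect b) (p : Int × Int) :
    ∀ (l : List (Int × Int)), (∀ d ∈ l, d.1 * d.1 + d.2 * d.2 = 1) →
    ∀ (bd : List (List Int)) (κ : Int × Int → Int),
      KRel b bd (fun q => κ q + raysCnt b p l q) → (∀ q, 0 ≤ κ q) →
      KRel b (l.foldl (fun x d => del_cctv x p d) bd) κ := by
  intro l
  induction l with
  | nil =>
    intro _ bd κ h _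
    exact KRel_congr h (fun q => by simp [raysCnt])
  | cons d l ih =>
    intro hu bd κ h hpos
    simp only [List.foldl_cons]
    have h0 : KRel b bd (fun q => (fun q' => κ q' + raysCnt b p l q') q + (if q ∈ bRay b p d then 1 else 0)) := by
      refine KRel_congr h (fun q => ?_)
      rw [raysCnt_cons]
      ring
    have h1 := del_one hrect p d (hu d (by simp)) h0
      (fun q => by have := hpos q; have := raysCnt_nonneg b p l q; omega)
    exact ih (fun d' hd' => hu d' (by simp [hd'])) _ κ h1 hpos

-- B's covered-set update over a group, and its membership
def covUpd (b : List (List Int)) (p : Int × Int) (l : List (Int × Int))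
    (cov : PySem.Set (Int × Int)) : PySem.Set (Int × Int) :=
  l.foldl (fun cv d => PySem.Set.union cv (PySem.Set.ofList (bRay b p d))) cov

lemma mem_covUpd (b : List (List Int)) (p : Int × Int) (l : List (Int × Int))
    (cov : PySem.Set (Int × Int)) (q : Int × Int) :
    q ∈ covUpd b p l cov ↔ q ∈ cov ∨ ∃ d ∈ l, q ∈ bRay b p d := by
  induction l generalizing cov with
  | nil => simp [covUpd]
  | cons d l ih =>
    show q ∈ covUpd b p l (PySem.Set.union cov (PySem.Set.ofList (bRay b p d))) ↔ _
    rw [ih, PySem.Set.mem_union, PySem.Set.mem_ofList]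
    simp only [List.mem_cons]
    constructor
    · rintro ((hc | hr) | ⟨d', hd', hq⟩)
      · exact Or.inl hc
      · exact Or.inr ⟨d, Or.inl rfl, hr⟩
      · exact Or.inr ⟨d', Or.inr hd', hq⟩
    · rintro (hc | ⟨d', (rfl | hd'), hq⟩)
      · exact Or.inl (Or.inl hc)
      · exact Or.inl (Or.inr hq)
      · exact Or.inr ⟨d', hd', hq⟩

lemma pyGet?_cons_succ_int {α : Type} (x : α) (xs : List α) {c : Int} (hc : 0 ≤ c) :
    PySem.List.pyGet? (x :: xs) (c + 1) = PySem.List.pyGet? xs c := by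
  have h : c = ((c.toNat : Nat) : Int) := by omega
  rw [h, PySem.List.pyGet?_cons_succ]

-- one row of the two base-case counts
lemma row_count (κ : Int × Int → Int) (cov : PySem.Set (Int × Int))
    (hcov : ∀ q, q ∈ cov ↔ κ q ≠ 0) (hpos : ∀ q, 0 ≤ κ q) (i : Int) :
    ∀ (r r' : List Int) (t : Int) (acc : Int),
      (∀ c : Int, 0 ≤ c → (PySem.List.pyGet? r' c).getD 0
          = if 0 < (PySem.List.pyGet? r c).getD 0 then (PySem.List.pyGet? r c).getD 0
            else (PySem.List.pyGet? r c).getD 0 - κ (i, t + c)) →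
      r'.length = r.length →
      r'.foldl (fun a p => if p = 0 then a + 1 else a) acc
        = acc + ((PySem.List.enumerate r t).map (fun jp =>
            if jp.2 = 0 ∧ ¬ (i, jp.1) ∈ cov then (1 : Int) else 0)).sum := by
  intro r
  induction r with
  | nil =>
    intro r' t acc _ hlen
    have : r' = [] := List.eq_nil_of_length_eq_zero (by simpa using hlen)
    subst this
    simp [PySem.List.enumerate]
  | cons x r ihr =>
    intro r' t acc hcell hlen
    cases r' with
    | nil => simp at hlen
    | cons x' r'' =>
      have hx : x' = if 0 < x then x else x - κ (i, t) := by
        have := hcell 0 (le_refl 0)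
        simpa [PySem.List.pyGet?_zero_cons] using this
      have hhead : (if x' = 0 then acc + 1 else acc)
          = acc + (if x = 0 ∧ ¬ (i, t) ∈ cov then (1 : Int) else 0) := by
        have hk := hpos (i, t)
        have hm := hcov (i, t)
        by_cases hxz : x' = 0
        · rw [if_pos hxz]
          have : x = 0 ∧ ¬ (i, t) ∈ cov := by
            constructor
            · by_cases h0 : 0 < x
              · rw [if_pos h0] at hx; omega
              · rw [if_neg h0] at hx; omega
            · intro hmem
              have := hm.mp hmem
              by_cases h0 : 0 < x
              · rw [if_pos h0] at hx; omega
              · rw [if_neg h0] at hx; omega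
          rw [if_pos this]
        · rw [if_neg hxz]
          have : ¬ (x = 0 ∧ ¬ (i, t) ∈ cov) := by
            rintro ⟨hx0, hnm⟩
            have hk0 : κ (i, t) = 0 := by
              by_contra hne
              exact hnm (hm.mpr hne)
            rw [hx0] at hx
            simp at hx
            omega
          rw [if_neg this]
          omega
      simp only [List.foldl_cons, PySem.List.enumerate_cons, List.map_cons, List.sum_cons]
      rw [ihr r'' (t + 1) (if x' = 0 then acc + 1 else acc)
        (fun c hc => by
          have := hcell (c + 1) (by omega)
          rw [pyGet?_cons_succ_int x' r'' hc, pyGet?_cons_succ_int x r hc] at this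
          rw [show t + 1 + c = t + (c + 1) from by ring]
          exact this)
        (by simpa using hlen)]
      rw [hhead]
      ring

-- the two base-case counting loops, row by row
lemma count_rows (κ : Int × Int → Int) (cov : PySem.Set (Int × Int))
    (hcov : ∀ q, q ∈ cov ↔ κ q ≠ 0) (hpos : ∀ q, 0 ≤ κ q) :
    ∀ (L L' : List (List Int)) (s : Int) (acc : Int),
      (∀ a c : Int, 0 ≤ a → 0 ≤ c → pvCell L' a c
          = if 0 < pvCell L a c then pvCell L a c else pvCell L a c - κ (s + a, c)) →
      L'.map List.length = L.map List.length →
      L'.foldl (fun a line => line.foldl (fun a p => if p = 0 then a + 1 else a) a) acc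
        = acc + ((PySem.List.enumerate L s).map (fun li =>
            ((PySem.List.enumerate li.2).map (fun jp =>
              if jp.2 = 0 ∧ ¬ (li.1, jp.1) ∈ cov then (1 : Int) else 0)).sum)).sum := by
  intro L
  induction L with
  | nil =>
    intro L' s acc _ hlen
    have : L' = [] := by
      cases L' with
      | nil => rfl
      | cons _ _ => simp at hlen
    subst this
    simp [PySem.List.enumerate]
  | cons r L ihL =>
    intro L' s acc hcell hlen
    cases L' with
    | nil => simp at hlen
    | cons r' L'' =>
      simp only [List.map_cons, List.cons.injEq] at hlen
      have hrowcell : ∀ c : Int, 0 ≤ c → (PySem.List.pyGet? r' c).getD 0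
          = if 0 < (PySem.List.pyGet? r c).getD 0 then (PySem.List.pyGet? r c).getD 0
            else (PySem.List.pyGet? r c).getD 0 - κ (s, 0 + c) := by
        intro c hc
        have := hcell 0 c (le_refl 0) hc
        simp only [pvCell, pvRow, PySem.List.pyGet?_zero_cons, Option.getD_some] at this
        rw [show s + 0 = s from by ring] at this
        rw [show (0 : Int) + c = c from by ring]
        exact this
      have htailcell : ∀ a c : Int, 0 ≤ a → 0 ≤ c → pvCell L'' a c
          = if 0 < pvCell L a c then pvCell L a c else pvCell L a c - κ ((s + 1) + a, c) := by
        intro a c ha hc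
        have := hcell (a + 1) c (by omega) hc
        have e1 : pvRow (r' :: L'') (a + 1) = pvRow L'' a := by
          unfold pvRow; rw [pyGet?_cons_succ_int r' L'' ha]
        have e2 : pvRow (r :: L) (a + 1) = pvRow L a := by
          unfold pvRow; rw [pyGet?_cons_succ_int r L ha]
        simp only [pvCell, e1, e2] at this
        rw [show (s + 1) + a = s + (a + 1) from by ring]
        exact this
      simp only [List.foldl_cons, PySem.List.enumerate_cons, List.map_cons, List.sum_cons]
      rw [ihL L'' (s + 1) _ htailcell hlen.2]
      rw [row_count κ cov hcov hpos s r r' 0 acc hrowcell hlen.1]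
      ring

-- the base case: counting zeros of the working board = counting uncovered zeros of the original
lemma count_bridge {b b' : List (List Int)} {κ : Int × Int → Int} {cov : PySem.Set (Int × Int)}
    (h : KRel b b' κ) (hpos : ∀ q, 0 ≤ κ q) (hcov : ∀ q, q ∈ cov ↔ κ q ≠ 0) :
    countZeros b' = countUncov b cov := by
  unfold countZeros countUncov
  rw [count_rows κ cov hcov hpos b b' 0 0
    (fun a c ha hc => by rw [show (0 : Int) + a = a from by ring]; exact h.2 a c ha hc) h.1]
  ring

-- all direction entries of the table are unit steps, and the group list of a valid type is nonempty
lemma cctvDirs_unit (t : Int) : ∀ g ∈ cctvDirs t, ∀ d ∈ g, d.1 * d.1 + d.2 * d.2 = 1 := by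
  unfold cctvDirs
  split_ifs <;> decide

lemma cctvDirs_ne_nil {t : Int} (h1 : 1 ≤ t) (h5 : t ≤ 5) : cctvDirs t ≠ [] := by
  unfold cctvDirs
  have : t = 1 ∨ t = 2 ∨ t = 3 ∨ t = 4 ∨ t = 5 := by omega
  rcases this with h | h | h | h | h <;> simp [h]

-- bMin is min on Option Int, and A's aMin is the same function
lemma bMin_some (a x : Int) : bMin (some a) x = some (min a x) := by
  show (if x < a then some x else some a) = some (min a x)
  split_ifs <;> simp [min_def] <;> omega

lemma aMin_eq_bMin : ∀ (m : Option Int) (x : Int), aMin m x = bMin m x := by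
  intro m x
  cases m with
  | none => rfl
  | some y => rw [bMin_some]; unfold aMin; simp [min_def]

-- ordering on Option Int results of bMin folds (none = not yet any value)
def oLe : Option Int → Option Int → Prop
  | none, none => True
  | some a, some b => a ≤ b
  | _, _ => False

lemma oLe_bMin {m' m : Option Int} (h : oLe m' m) {x' x : Int} (hx : x' ≤ x) :
    oLe (bMin m' x') (bMin m x) := by
  cases m' <;> cases m <;> simp [oLe] at h ⊢
  · exact hx
  · rw [bMin_some, bMin_some]
    exact min_le_min h hx

lemma foldl_bMin_mono {α : Type} (l : List α) (V V' : α → Int)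
    (h : ∀ g ∈ l, V' g ≤ V g) :
    ∀ (acc acc' : Option Int), oLe acc' acc →
      oLe (l.foldl (fun m g => bMin m (V' g)) acc') (l.foldl (fun m g => bMin m (V g)) acc) := by
  induction l with
  | nil => intro acc acc' hacc; exact hacc
  | cons g l ih =>
    intro acc acc' hacc
    simp only [List.foldl_cons]
    exact ih (fun g' hg' => h g' (by simp [hg'])) _ _
      (oLe_bMin hacc (h g (by simp)))

lemma oLe_getD {m' m : Option Int} (h : oLe m' m) : m'.getD 0 ≤ m.getD 0 := by
  cases m' <;> cases m <;> simp [oLe] at h ⊢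
  omega

-- fold of bMin from some a stays at some of the minimum; if everything is ≥ a it stays a
lemma foldl_bMin_const (l : List Int) :
    ∀ (a : Int), (∀ x ∈ l, a ≤ x) → l.foldl bMin (some a) = some a := by
  intro a h
  induction l generalizing a with
  | nil => rfl
  | cons x xs ih =>
    simp only [List.foldl_cons, bMin_some]
    have hax : a ≤ x := h x (by simp)
    rw [min_eq_left hax]
    exact ih a (fun y hy => h y (by simp [hy]))

-- fuel irrelevance of B above the needed depth
lemma dfsAuxB_fuel (b : List (List Int)) (points : List (Int × Int)) :
    ∀ (f₁ f₂ : Nat) (idx : Int) (cov : PySem.Set (Int × Int)),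
      ((points.length : Int) - idx).toNat < f₁ → ((points.length : Int) - idx).toNat < f₂ →
      dfsAuxB f₁ b points idx cov = dfsAuxB f₂ b points idx cov := by
  intro f₁
  induction f₁ with
  | zero => intro f₂ idx cov h1 h2; omega
  | succ f₁ ih =>
    intro f₂ idx cov h1 h2
    cases f₂ with
    | zero => omega
    | succ f₂ =>
      by_cases hbase : (points.length : Int) ≤ idx
      · simp only [dfsAuxB, if_pos hbase]
      · simp only [dfsAuxB, if_neg hbase]
        congr 1
        apply List.foldl_ext
        intro m g _
        congr 1
        exact ih f₂ (idx + 1) _ (by omega) (by omega)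

lemma countUncov_anti (b : List (List Int)) {cov cov' : PySem.Set (Int × Int)}
    (h : ∀ q, q ∈ cov → q ∈ cov') : countUncov b cov' ≤ countUncov b cov := by
  apply List.sum_le_sum
  intro li _
  apply List.sum_le_sum
  intro jp _
  split_ifs with h1 h2
  · omega
  · exact absurd ⟨h1.1, fun hc => h1.2 (h _ hc)⟩ h2
  · omega
  · omega

-- B is antitone in the covered set
lemma dfsAuxB_anti (b : List (List Int)) (points : List (Int × Int)) :
    ∀ (f : Nat) (idx : Int) (cov cov' : PySem.Set (Int × Int)),
      (∀ q, q ∈ cov → q ∈ cov') →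
      dfsAuxB f b points idx cov' ≤ dfsAuxB f b points idx cov := by
  intro f
  induction f with
  | zero => intro idx cov cov' h; exact le_refl 0
  | succ f ih =>
    intro idx cov cov' h
    by_cases hbase : (points.length : Int) ≤ idx
    · simp only [dfsAuxB, if_pos hbase]
      exact countUncov_anti b h
    · simp only [dfsAuxB, if_neg hbase]
      apply oLe_getD
      apply foldl_bMin_mono _ _ _ _ none none trivial
      intro g _
      apply ih
      intro q hq
      rcases (mem_covUpd b ((PySem.List.pyGet? points idx).getD (0, 0)) g cov q).mp hq with h2 | h2
      · exact (mem_covUpd b ((PySem.List.pyGet? points idx).getD (0, 0)) g cov' q).mpr (Or.inl (h q h2))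
      · exact (mem_covUpd b ((PySem.List.pyGet? points idx).getD (0, 0)) g cov' q).mpr (Or.inr h2)

lemma bMin_run (xs : List Int) : ∀ a : Int,
    ∃ m, xs.foldl bMin (some a) = some m ∧ m ≤ a ∧ ∀ x ∈ xs, m ≤ x := by
  induction xs with
  | nil => intro a; exact ⟨a, rfl, le_refl a, by simp⟩
  | cons x xs ih =>
    intro a
    obtain ⟨m, heq, hma, hall⟩ := ih (min a x)
    refine ⟨m, ?_, by omega, ?_⟩
    · simp only [List.foldl_cons, bMin_some]
      exact heq
    · intro y hy
      rcases List.mem_cons.mp hy with rfl | hy'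
      · omega
      · exact hall y hy'

lemma bMin_none_run (xs : List Int) (hne : xs ≠ []) :
    ∃ m, xs.foldl bMin none = some m ∧ ∀ x ∈ xs, m ≤ x := by
  cases xs with
  | nil => exact absurd rfl hne
  | cons x xs =>
    obtain ⟨m, heq, hma, hall⟩ := bMin_run xs x
    refine ⟨m, ?_, ?_⟩
    · simp only [List.foldl_cons]
      exact heq
    · intro y hy
      rcases List.mem_cons.mp hy with rfl | hy'
      · exact hma
      · exact hall y hy'

-- the point & type facts Pre_ supplies for index j
def ValidAt (b : List (List Int)) (points : List (Int × Int)) (j : Int) : Prop :=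
  ∃ p, PySem.List.pyGet? points j = some p ∧
    1 ≤ pvCell b p.1 p.2 ∧ pvCell b p.1 p.2 ≤ 5

lemma validPtB_cell {b : List (List Int)} {p : Int × Int} (h : validPtB b p = true) :
    1 ≤ pvCell b p.1 p.2 ∧ pvCell b p.1 p.2 ≤ 5 := by
  unfold validPtB at h
  cases he : (PySem.List.pyGet? b p.1).bind (fun row => PySem.List.pyGet? row p.2) with
  | none => rw [he] at h; simp at h
  | some v =>
    rw [he] at h
    simp only [decide_eq_true_eq] at h
    obtain ⟨row, hrow, hcv⟩ := Option.bind_eq_some_iff.mp he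
    have : pvCell b p.1 p.2 = v := by
      unfold pvCell pvRow
      rw [hrow]
      simp [hcv]
    rw [this]
    exact h

lemma pre_validAt {board : List (List Int)} {points : List (Int × Int)} {cur_idx : Int}
    (h : -(points.length : Int) ≤ cur_idx)
    (hv : ∀ j ∈ List.range points.length, (cur_idx ≤ (j : Int) ∨ cur_idx < 0) →
        validPtB board (points.getD j ((0 : Int), (0 : Int))) = true) :
    ∀ j : Int, cur_idx ≤ j → j < (points.length : Int) → ValidAt board points j := by
  intro j hj1 hj2
  by_cases hj0 : 0 ≤ j
  · have hjn : j.toNat < points.length := by omega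
    have hget : PySem.List.pyGet? points j = some (points[j.toNat]) :=
      PySem.List.pyGet?_eq_some_getElem points hj0 hj2
    refine ⟨points[j.toNat], hget, ?_⟩
    have hv' := hv j.toNat (List.mem_range.mpr hjn) (Or.inl (by omega))
    rw [List.getD_eq_getElem points (0, 0) hjn] at hv'
    exact validPtB_cell hv'
  · have hcur : cur_idx < 0 := by omega
    have hk1 : 0 < (-j).toNat := by omega
    have hk2 : (-j).toNat ≤ points.length := by omega
    have hidx : points.length - (-j).toNat < points.length := by omega
    have hget' : PySem.List.pyGet? points j = points[points.length - (-j).toNat]? := by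
      conv_lhs => rw [show j = -(((-j).toNat : Nat) : Int) from by omega]
      exact PySem.List.pyGet?_neg_natCast points ((-j).toNat) hk1 hk2
    have hget : PySem.List.pyGet? points j = some (points[points.length - (-j).toNat]) := by
      rw [hget', List.getElem?_eq_getElem hidx]
    refine ⟨_, hget, ?_⟩
    have hv' := hv (points.length - (-j).toNat) (List.mem_range.mpr hidx) (Or.inr hcur)
    rw [List.getD_eq_getElem points (0, 0) hidx] at hv'
    exact validPtB_cell hv'

-- the candidate values of B at index i (one per direction group)
def BVal (b : List (List Int)) (points : List (Int × Int)) (f' : Nat)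
    (cov : PySem.Set (Int × Int)) (i : Int) (g : List (Int × Int)) : Int :=
  dfsAuxB f' b points (i+1) (covUpd b ((PySem.List.pyGet? points i).getD (0, 0)) g cov)

def BVals (b : List (List Int)) (points : List (Int × Int)) (f' : Nat)
    (cov : PySem.Set (Int × Int)) (i : Int) : List Int :=
  (cctvDirs (pvCell b ((PySem.List.pyGet? points i).getD (0, 0)).1
      ((PySem.List.pyGet? points i).getD (0, 0)).2)).map (BVal b points f' cov i)

lemma dfsAuxB_unfold (b : List (List Int)) (points : List (Int × Int)) (f' : Nat)
    (i : Int) (cov : PySem.Set (Int × Int)) (hi : ¬ (points.length : Int) ≤ i) :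
    dfsAuxB (f'+1) b points i cov = ((BVals b points f' cov i).foldl bMin none).getD 0 := by
  simp only [dfsAuxB, if_neg hi]
  unfold BVals BVal
  rw [List.foldl_map]
  rfl

lemma BVals_ne_nil {b : List (List Int)} {points : List (Int × Int)} (f' : Nat)
    {i : Int} (cov : PySem.Set (Int × Int)) (hval : ValidAt b points i) :
    BVals b points f' cov i ≠ [] := by
  obtain ⟨p, hp, h1, h5⟩ := hval
  unfold BVals
  rw [hp]
  simp only [Option.getD_some, ne_eq, List.map_eq_nil_iff]
  exact cctvDirs_ne_nil h1 h5

-- B never gets smaller when the start index moves up (the extra CCTV only covers more)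
lemma dfsAuxB_step (b : List (List Int)) (points : List (Int × Int))
    (f : Nat) (idx : Int) (cov : PySem.Set (Int × Int))
    (hval : ValidAt b points idx) (hidx : idx < (points.length : Int))
    (hf : ((points.length : Int) - idx).toNat < f) :
    dfsAuxB f b points idx cov ≤ dfsAuxB f b points (idx + 1) cov := by
  cases f with
  | zero => omega
  | succ f' =>
    rw [dfsAuxB_unfold b points f' idx cov (by omega)]
    obtain ⟨m, heq, hall⟩ := bMin_none_run _ (BVals_ne_nil f' cov hval)
    rw [heq]
    simp only [Option.getD_some]
    obtain ⟨p, hp, h1, h5⟩ := hval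
    obtain ⟨g₀, hg₀⟩ := List.exists_mem_of_ne_nil _ (cctvDirs_ne_nil h1 h5)
    have hmem : BVal b points f' cov idx g₀ ∈ BVals b points f' cov idx := by
      unfold BVals
      rw [hp]
      exact List.mem_map_of_mem hg₀
    have h2 := hall _ hmem
    have h3 : BVal b points f' cov idx g₀ ≤ dfsAuxB f' b points (idx+1) cov := by
      unfold BVal
      apply dfsAuxB_anti
      intro q hq
      exact (mem_covUpd b _ g₀ cov q).mpr (Or.inl hq)
    have h4 : dfsAuxB f' b points (idx+1) cov = dfsAuxB (f'+1) b points (idx+1) cov :=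
      dfsAuxB_fuel b points f' (f'+1) (idx+1) cov (by omega) (by omega)
    omega

lemma dfsAuxB_chain (b : List (List Int)) (points : List (Int × Int))
    (f : Nat) (k : Int) (cov : PySem.Set (Int × Int))
    (hval : ∀ j : Int, k ≤ j → j < (points.length : Int) → ValidAt b points j)
    (hf : ((points.length : Int) - k).toNat < f) :
    ∀ i : Int, k ≤ i → i ≤ (points.length : Int) →
      dfsAuxB f b points k cov ≤ dfsAuxB f b points i cov := by
  intro i hki hin
  obtain ⟨N, hN⟩ : ∃ N : Nat, i - k = (N : Int) := ⟨(i - k).toNat, by omega⟩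
  induction N generalizing i with
  | zero =>
    have : i = k := by omega
    subst this
    exact le_refl _
  | succ N ih =>
    have h1 := ih (i - 1) (by omega) (by omega) (by omega)
    have h2 := dfsAuxB_step b points f (i - 1) cov
      (hval (i - 1) (by omega) (by omega)) (by omega) (by omega)
    rw [show (i - 1) + 1 = i from by omega] at h2
    omega

-- one direction-group iteration of A's inner loop, with the board restored afterwards
lemma inner_fold (b : List (List Int)) (points : List (Int × Int)) (hrect : Rect b)
    (f' : Nat) (κ : Int × Int → Int) (cov : PySem.Set (Int × Int))
    (hpos : ∀ q, 0 ≤ κ q) (hcov : ∀ q, q ∈ cov ↔ κ q ≠ 0)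
    (i : Int) (p : Int × Int)
    (Hrec1 : ∀ (bd : List (List Int)) (κ₂ : Int × Int → Int) (cov₂ : PySem.Set (Int × Int)),
      KRel b bd κ₂ → (∀ q, 0 ≤ κ₂ q) → (∀ q, q ∈ cov₂ ↔ κ₂ q ≠ 0) →
      dfsAuxA f' bd points (i+1) = dfsAuxB f' b points (i+1) cov₂) :
    ∀ (l : List (List (Int × Int))), (∀ g ∈ l, ∀ d ∈ g, d.1 * d.1 + d.2 * d.2 = 1) →
    ∀ (bd : List (List Int)) (m : Option Int), KRel b bd κ →
      KRel b ((l.foldl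
        (fun (st2 : List (List Int) × Option Int) directions =>
          let bd2 := directions.foldl (fun b d => set_cctv b p d) st2.1
          let m2 := aMin st2.2 (dfsAuxA f' bd2 points (i+1))
          let bd3 := directions.foldl (fun b d => del_cctv b p d) bd2
          (bd3, m2)) (bd, m))).1 κ ∧
      ((l.foldl
        (fun (st2 : List (List Int) × Option Int) directions =>
          let bd2 := directions.foldl (fun b d => set_cctv b p d) st2.1
          let m2 := aMin st2.2 (dfsAuxA f' bd2 points (i+1))
          let bd3 := directions.foldl (fun b d => del_cctv b p d) bd2
          (bd3, m2)) (bd, m))).2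
        = (l.map (fun g => dfsAuxB f' b points (i+1) (covUpd b p g cov))).foldl bMin m := by
  intro l
  induction l with
  | nil => intro _ bd m h; exact ⟨h, rfl⟩
  | cons g l ihl =>
    intro hu bd m h
    have hsg := set_group hrect p g (hu g (by simp)) bd κ h hpos
    have hκ2pos : ∀ q, 0 ≤ κ q + raysCnt b p g q := fun q => by
      have := hpos q; have := raysCnt_nonneg b p g q; omega
    have hcov2 : ∀ q, q ∈ covUpd b p g cov ↔ (κ q + raysCnt b p g q) ≠ 0 := by
      intro q
      rw [mem_covUpd]
      have h1 := hcov q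
      have h2 := raysCnt_ne_zero_iff b p g q
      have h3 := hpos q
      have h4 := raysCnt_nonneg b p g q
      constructor
      · rintro (hc | hr)
        · have := h1.mp hc; omega
        · have := h2.mpr hr; omega
      · intro hne
        by_cases hκq : κ q ≠ 0
        · exact Or.inl (h1.mpr hκq)
        · have : raysCnt b p g q ≠ 0 := by omega
          exact Or.inr (h2.mp this)
    have hA := Hrec1 _ _ _ hsg hκ2pos hcov2
    have hdg := del_group hrect p g (hu g (by simp)) _ κ hsg hpos
    simp only [List.foldl_cons, List.map_cons]
    rw [hA, aMin_eq_bMin]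
    exact ihl (fun g' hg' => hu g' (by simp [hg'])) _ _ hdg

-- A's outer loop: the board is restored every iteration and the min accumulates B's values
lemma outer_fold (b : List (List Int)) (points : List (Int × Int)) (hrect : Rect b)
    (f' : Nat) (κ : Int × Int → Int) (cov : PySem.Set (Int × Int))
    (hpos : ∀ q, 0 ≤ κ q) (hcov : ∀ q, q ∈ cov ↔ κ q ≠ 0) (k : Int)
    (hval : ∀ j : Int, k ≤ j → j < (points.length : Int) → ValidAt b points j)
    (Hrec : ∀ i : Int, k ≤ i → i < (points.length : Int) →
      ∀ (bd : List (List Int)) (κ₂ : Int × Int → Int) (cov₂ : PySem.Set (Int × Int)),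
        KRel b bd κ₂ → (∀ q, 0 ≤ κ₂ q) → (∀ q, q ∈ cov₂ ↔ κ₂ q ≠ 0) →
        dfsAuxA f' bd points (i+1) = dfsAuxB f' b points (i+1) cov₂) :
    ∀ (N : Nat) (j : Int), ((points.length : Int) - j).toNat = N →
      k ≤ j → j ≤ (points.length : Int) →
    ∀ (bd : List (List Int)) (m : Option Int), KRel b bd κ →
      KRel b (((PySem.List.pyRange j (points.length : Int) 1).foldl
        (fun (st : List (List Int) × Option Int) i =>
          let cur_point := (PySem.List.pyGet? points i).getD (0, 0)
          let t := pvCell st.1 cur_point.1 cur_point.2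
          (cctvDirs t).foldl
            (fun (st2 : List (List Int) × Option Int) directions =>
              let bd2 := directions.foldl (fun b d => set_cctv b cur_point d) st2.1
              let m2 := aMin st2.2 (dfsAuxA f' bd2 points (i+1))
              let bd3 := directions.foldl (fun b d => del_cctv b cur_point d) bd2
              (bd3, m2))
            st)
        (bd, m))).1 κ ∧
      (((PySem.List.pyRange j (points.length : Int) 1).foldl
        (fun (st : List (List Int) × Option Int) i =>
          let cur_point := (PySem.List.pyGet? points i).getD (0, 0)
          let t := pvCell st.1 cur_point.1 cur_point.2
          (cctvDirs t).foldl
            (fun (st2 : List (List Int) × Option Int) directions =>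
              let bd2 := directions.foldl (fun b d => set_cctv b cur_point d) st2.1
              let m2 := aMin st2.2 (dfsAuxA f' bd2 points (i+1))
              let bd3 := directions.foldl (fun b d => del_cctv b cur_point d) bd2
              (bd3, m2))
            st)
        (bd, m))).2
        = ((PySem.List.pyRange j (points.length : Int) 1).flatMap
            (fun i => BVals b points f' cov i)).foldl bMin m := by
  intro N
  induction N with
  | zero =>
    intro j hN hjk hjn bd m h
    have hr : PySem.List.pyRange j (points.length : Int) 1 = [] :=
      PySem.List.pyRange_one_eq_nil (by omega)
    rw [hr]
    exact ⟨h, rfl⟩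
  | succ N ihN =>
    intro j hN hjk hjn bd m h
    have hjn' : j < (points.length : Int) := by omega
    obtain ⟨p, hp, h1, h5⟩ := hval j hjk hjn'
    rw [PySem.List.pyRange_one_cons hjn']
    simp only [List.foldl_cons, List.flatMap_cons]
    rw [List.foldl_append]
    have ht : pvCell bd p.1 p.2 = pvCell b p.1 p.2 := cell_eq_of_pos h p.1 p.2 (by omega)
    have hBV : BVals b points f' cov j
        = (cctvDirs (pvCell b p.1 p.2)).map
            (fun g => dfsAuxB f' b points (j+1) (covUpd b p g cov)) := by
      unfold BVals BVal
      rw [hp]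
      rfl
    have hinner := inner_fold b points hrect f' κ cov hpos hcov j p
      (fun bd₂ κ₂ cov₂ h2 h3 h4 => Hrec j hjk hjn' bd₂ κ₂ cov₂ h2 h3 h4)
      (cctvDirs (pvCell b p.1 p.2)) (cctvDirs_unit _) bd m h
    rw [hp]
    simp only [Option.getD_some, ht]
    refine ⟨(ihN (j+1) (by omega) (by omega) (by omega) _ _ hinner.1).1, ?_⟩
    rw [(ihN (j+1) (by omega) (by omega) (by omega) _ _ hinner.1).2, hinner.2, hBV]

-- ===== the main simulation =====
lemma main_sim (b : List (List Int)) (points : List (Int × Int)) (hrect : Rect b) :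
    ∀ (f : Nat) (k : Int) (b' : List (List Int)) (κ : Int × Int → Int)
      (cov : PySem.Set (Int × Int)),
      KRel b b' κ → (∀ q, 0 ≤ κ q) → (∀ q, q ∈ cov ↔ κ q ≠ 0) →
      (∀ j : Int, k ≤ j → j < (points.length : Int) → ValidAt b points j) →
      -(points.length : Int) ≤ k →
      ((points.length : Int) - k).toNat < f →
      dfsAuxA f b' points k = dfsAuxB f b points k cov := by
  intro f
  induction f with
  | zero => intro k b' κ cov _ _ _ _ _ hfuel; omega
  | succ f' ih =>
    intro k b' κ cov hrel hpos hcov hval hneg hfuel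
    by_cases hk : (points.length : Int) ≤ k
    · simp only [dfsAuxA, dfsAuxB, if_pos hk]
      exact count_bridge hrel hpos hcov
    · have hOF := outer_fold b points hrect f' κ cov hpos hcov k hval
        (fun i hik hin bd κ₂ cov₂ h2 h3 h4 =>
          ih (i+1) bd κ₂ cov₂ h2 h3 h4
            (fun j hj1 hj2 => hval j (by omega) hj2) (by omega) (by omega))
        (((points.length : Int) - k).toNat) k rfl (le_refl k) (by omega) b' none hrel
      simp only [dfsAuxA, if_neg hk]
      rw [hOF.2]
      have hk' : k < (points.length : Int) := by omega
      rw [PySem.List.pyRange_one_cons hk']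
      simp only [List.flatMap_cons]
      rw [List.foldl_append]
      obtain ⟨m₀, hm₀, hall₀⟩ := bMin_none_run (BVals b points f' cov k)
        (BVals_ne_nil f' cov (hval k (le_refl k) hk'))
      have hBk : dfsAuxB (f'+1) b points k cov = m₀ := by
        rw [dfsAuxB_unfold b points f' k cov hk, hm₀]
        rfl
      rw [hm₀]
      have hrest : ∀ x ∈ (PySem.List.pyRange (k+1) (points.length : Int) 1).flatMap
          (fun i => BVals b points f' cov i), m₀ ≤ x := by
        intro x hx
        obtain ⟨i, hi, hx2⟩ := List.mem_flatMap.mp hx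
        have hi' := (PySem.List.mem_pyRange_one).mp hi
        have hchain := dfsAuxB_chain b points (f'+1) k cov hval (by omega)
          i (by omega) (by omega)
        have hiun := dfsAuxB_unfold b points f' i cov (by omega)
        obtain ⟨mᵢ, hmᵢ, hallᵢ⟩ := bMin_none_run (BVals b points f' cov i)
          (BVals_ne_nil f' cov (hval i (by omega) (by omega)))
        have hxle := hallᵢ x hx2
        rw [hiun, hmᵢ] at hchain
        simp only [Option.getD_some] at hchain
        rw [hBk] at hchain
        omega
      rw [foldl_bMin_const _ m₀ hrest, hBk]
      rfl

-- ===== VERDICT (by name: the statement is the Claim_ definition above) =====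
theorem dfs_spec : Claim_equal_dfs := by
  intro board points cur_idx _hdom hpre
  unfold Spec_dfs dfs dfs_alt
  have hRel : KRel board board (fun _ => 0) := by
    refine ⟨rfl, fun a c _ _ => ?_⟩
    split <;> simp
  have hfuel : ((points.length : Int) - cur_idx).toNat <
      (((points.length : Int) + 1 - cur_idx).toNat + 1) := by omega
  rcases hpre with hge | ⟨hneg, hrect, hv⟩
  · -- pure counting case: both sides are the base count, related by KRel with κ = 0
    have h1 : dfsAuxA (((points.length : Int) + 1 - cur_idx).toNat + 1) board points cur_idx
        = countZeros board := by
      simp only [dfsAuxA, if_pos hge]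
    have h2 : dfsAuxB (((points.length : Int) + 1 - cur_idx).toNat + 1) board points cur_idx PySem.Set.empty
        = countUncov board PySem.Set.empty := by
      simp only [dfsAuxB, if_pos hge]
    rw [h1, h2]
    exact count_bridge hRel (fun _ => le_refl 0) (by intro q; simp [PySem.Set.empty])
  · exact main_sim board points hrect _ cur_idx board _ PySem.Set.empty hRel
      (fun _ => le_refl 0) (by intro q; simp [PySem.Set.empty])
      (pre_validAt hneg hv) hneg hfuel
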